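-- pv_equiv track=rewrite | github.com/eladkap/leetcode | main.py | calcOnes
-- ===== SOURCE A (Python) =====
-- def calcOnes(nums: list) -> int:
--     max_count = 0
--     c = 0
--     for i in range(len(nums)):
--         if nums[i] == -1:
--             continue
--         if nums[i] == 1:
--             c += 1
--         else:
--             max_count = max(max_count, c)
--             c = 0
--     return max(max_count, c)
-- ===== SOURCE B (Python) =====
-- def calcOnes(nums: list) -> int:
--     # filter-then-group: drop every -1, then scan maximal runs with two pointers
--     filtered = [x for x in nums if x != -1]
--     best = 0
--     i = 0
--     n = len(filtered)
--     while i < n: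
--         j = i + 1
--         while j < n and filtered[j] == filtered[i]:
--             j += 1
--         if filtered[i] == 1:
--             best = max(best, j - i)
--         i = j
--     return best
-- ===== Notes on version B (the rewrite author's own statement) =====
-- stated objective: alternative
-- what changed: Replaced the single stateful max/counter accumulator loop by a filter-then-group decomposition: drop every -1 first, then scan maximal runs of equal values with two pointers and take the best run of 1s.
import Mathlib
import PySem

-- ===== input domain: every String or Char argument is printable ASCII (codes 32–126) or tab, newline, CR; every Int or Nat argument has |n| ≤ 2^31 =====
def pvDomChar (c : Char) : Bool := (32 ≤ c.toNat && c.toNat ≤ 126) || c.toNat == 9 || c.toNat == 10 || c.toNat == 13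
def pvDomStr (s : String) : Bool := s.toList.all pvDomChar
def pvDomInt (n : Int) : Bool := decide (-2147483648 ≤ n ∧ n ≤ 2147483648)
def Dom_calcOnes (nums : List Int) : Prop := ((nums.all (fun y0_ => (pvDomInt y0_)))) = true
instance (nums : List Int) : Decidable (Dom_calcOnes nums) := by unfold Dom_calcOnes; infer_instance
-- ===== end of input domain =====

-- B replaces A's single stateful max/counter loop by a filter-then-group scan (drop -1, then maximal runs); alternative decomposition, same cost.

-- ===== PORT A =====
-- loop body of A: skip -1, count 1s, otherwise flush the counter into max_count
def pvStepA (s : Int × Int) (x : Int) : Int × Int :=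
  if x = -1 then s
  else if x = 1 then (s.1, s.2 + 1)
  else (max s.1 s.2, 0)

def calcOnes (nums : List Int) : Int :=
  let s := (PySem.List.pyRange 0 (nums.length : Int) 1).foldl
      (fun acc i => pvStepA acc (PySem.List.pyGetD nums i 0)) ((0 : Int), (0 : Int))
  max s.1 s.2

-- ===== PORT B =====
-- the outer while loop of B over the filtered list: one step consumes a maximal run of equal values
def pvGoB (best : Int) : List Int → Int
  | [] => best
  | x :: xs =>
      pvGoB (if x = 1 then max best ((1 : Int) + (xs.takeWhile (· == x)).length) else best)
            (xs.dropWhile (· == x))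
  termination_by l => l.length
  decreasing_by
    simpa using Nat.lt_succ_of_le (List.length_dropWhile_le _ xs)

def calcOnes_alt (nums : List Int) : Int :=
  pvGoB 0 (nums.filter (fun x => x != -1))

-- ===== PRECONDITION & SPEC =====
def Spec_calcOnes (nums : List Int) (out : Int) : Prop := out = calcOnes_alt nums
instance (nums : List Int) (out : Int) : Decidable (Spec_calcOnes nums out) := by unfold Spec_calcOnes; infer_instance

-- ===== CLAIM (what is proved, stated in full; the proofs are below) =====
def Claim_equal_calcOnes : Prop := ∀ (nums : List Int), Dom_calcOnes nums → Spec_calcOnes nums (calcOnes nums)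

-- ===== LEMMAS AND PROOFS =====

-- A's result as a function of the loop state
def pvResA (m c : Int) (l : List Int) : Int :=
  let s := l.foldl pvStepA (m, c)
  max s.1 s.2

-- A's loop ignores the -1 entries: folding over l equals folding over the filtered list
theorem pvfold_filter (l : List Int) : ∀ s : Int × Int,
    l.foldl pvStepA s = (l.filter (fun x => x != -1)).foldl pvStepA s := by
  induction l with
  | nil => intro s; rfl
  | cons x xs ih =>
    intro s
    by_cases hx : x = -1
    · subst hx; simpa [pvStepA] using ih s
    · simp [hx, List.foldl_cons, ih]

-- folding over a run of 1s just adds its length to the counter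
theorem pvfold_ones (r : List Int) (hr : ∀ x ∈ r, x = 1) (m c : Int) :
    r.foldl pvStepA (m, c) = (m, c + r.length) := by
  induction r generalizing c with
  | nil => simp
  | cons x xs ih =>
    have hx : x = 1 := hr x (by simp)
    have := ih (fun y hy => hr y (by simp [hy])) (c + 1)
    simp [hx, pvStepA, this]
    ring

-- folding a run of non-1, non-(-1) values from state (0,0) stays at (0,0)
theorem pvfold_flush (r : List Int) (hr : ∀ x ∈ r, x ≠ 1 ∧ x ≠ -1) :
    r.foldl pvStepA (0, 0) = (0, 0) := by
  induction r with
  | nil => rfl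
  | cons x xs ih =>
    obtain ⟨h1, h2⟩ := hr x (by simp)
    simpa [pvStepA, h1, h2] using ih (fun y hy => hr y (by simp [hy]))

-- hoisting the max_count component out of A's loop
theorem pvResA_hoist (l : List Int) : ∀ m c : Int, 0 ≤ c →
    pvResA m c l = max m (pvResA 0 c l) := by
  induction l with
  | nil => intro m c hc; simp [pvResA]; omega
  | cons x xs ih =>
    intro m c hc
    by_cases h1 : x = -1
    · simpa [pvResA, pvStepA, h1] using ih m c hc
    · by_cases h2 : x = 1
      · simpa [pvResA, pvStepA, h1, h2] using ih m (c + 1) (by omega)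
      · have hA := ih (max m c) 0 le_rfl
        have hB := ih (max 0 c) 0 le_rfl
        simp only [pvResA, List.foldl_cons, pvStepA, h1, h2, if_false] at hA hB ⊢
        rw [hA, hB]
        omega

-- hoisting the accumulator out of B's loop
theorem pvGoB_hoist : ∀ n (l : List Int), l.length ≤ n → ∀ b : Int, 0 ≤ b →
    pvGoB b l = max b (pvGoB 0 l) := by
  intro n
  induction n with
  | zero =>
    intro l hl b hb
    have : l = [] := List.eq_nil_of_length_eq_zero (Nat.le_zero.mp hl)
    subst this; simp [pvGoB]; omega
  | succ n ih =>
    intro l hl b hb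
    match l with
    | [] => simp [pvGoB]; omega
    | x :: xs =>
      have hrest : (xs.dropWhile (· == x)).length ≤ n := by
        have := List.length_dropWhile_le (· == x) xs
        simp at hl; omega
      by_cases h1 : x = 1
      · have hb' : (0:Int) ≤ max b (1 + (xs.takeWhile (· == x)).length) := by positivity
        rw [pvGoB, pvGoB, if_pos h1, if_pos h1,
            ih _ hrest (max b ((1 : Int) + (xs.takeWhile (· == x)).length)) hb',
            ih _ hrest (max 0 ((1 : Int) + (xs.takeWhile (· == x)).length)) (by positivity)]
        have : (0:Int) ≤ (xs.takeWhile (· == x)).length := by positivity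
        omega
      · rw [pvGoB, pvGoB, if_neg h1, if_neg h1, ih _ hrest b hb]

-- the first element left by dropWhile fails the predicate
theorem pvDropWhileHead {p : Int → Bool} {l : List Int} {y : Int} {ys : List Int}
    (h : l.dropWhile p = y :: ys) : p y = false := by
  induction l with
  | nil => simp at h
  | cons a as ih =>
    by_cases hp : p a
    · rw [List.dropWhile_cons_of_pos hp] at h; exact ih h
    · rw [List.dropWhile_cons_of_neg hp] at h
      cases h
      simpa using hp

-- main lemma: on a -1-free list, A's loop from (0,0) equals B's run scan
theorem pvMain : ∀ n (l : List Int), l.length ≤ n → (∀ x ∈ l, x ≠ -1) →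
    pvResA 0 0 l = pvGoB 0 l := by
  intro n
  induction n with
  | zero =>
    intro l hl _
    have : l = [] := List.eq_nil_of_length_eq_zero (Nat.le_zero.mp hl)
    subst this; simp [pvResA, pvGoB]
  | succ n ih =>
    intro l hl hno
    match l with
    | [] => simp [pvResA, pvGoB]
    | x :: xs =>
      have hlen : xs.length ≤ n := by simp at hl; omega
      have hxno : x ≠ -1 := hno x (by simp)
      have hsplit : xs.takeWhile (· == x) ++ xs.dropWhile (· == x) = xs :=
        List.takeWhile_append_dropWhile
      have hrestlen : (xs.dropWhile (· == x)).length ≤ n := by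
        have := List.length_dropWhile_le (· == x) xs; omega
      have hrestno : ∀ y ∈ xs.dropWhile (· == x), y ≠ -1 := fun y hy =>
        hno y (by simp [List.mem_cons]; exact Or.inr ((List.dropWhile_sublist _).subset hy))
      have htake1 : ∀ y ∈ xs.takeWhile (· == x), y = x := fun y hy => by
        have := List.mem_takeWhile_imp hy; simpa using this
      by_cases h1 : x = 1
      · -- leading run of 1s of length 1 + k
        subst h1
        have hones : ∀ y ∈ xs.takeWhile (· == (1:Int)), y = 1 := htake1
        have hfold1 := pvfold_ones (xs.takeWhile (· == (1:Int))) hones 0 1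
        have hA : pvResA 0 0 (1 :: xs)
            = pvResA 0 (1 + (xs.takeWhile (· == (1:Int))).length) (xs.dropWhile (· == (1:Int))) := by
          simp only [pvResA, List.foldl_cons, pvStepA]
          norm_num
          conv_lhs => rw [← hsplit]
          rw [List.foldl_append, hfold1]
        -- analyse the rest
        rcases hrest : xs.dropWhile (· == (1:Int)) with _ | ⟨y, ys⟩
        · rw [hA, hrest, pvGoB, if_pos rfl, hrest, pvGoB]
          simp [pvResA]
        · have hy1 : y ≠ 1 := by
            have := pvDropWhileHead hrest
            simpa using this
          have hyno : y ≠ -1 := hrestno y (by rw [hrest]; simp)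
          have hyslen : ys.length ≤ n := by
            rw [hrest] at hrestlen; simp at hrestlen; omega
          have hysno : ∀ z ∈ ys, z ≠ -1 := fun z hz => hrestno z (by rw [hrest]; simp [hz])
          -- A side: step on y flushes the counter
          have hAside : pvResA 0 (1 + (xs.takeWhile (· == (1:Int))).length) (y :: ys)
              = max (1 + ((xs.takeWhile (· == (1:Int))).length : Int)) (pvResA 0 0 ys) := by
            simp only [pvResA, List.foldl_cons, pvStepA, hyno, hy1, if_false]
            have h0 : max (0:Int) (1 + ((xs.takeWhile (· == (1:Int))).length : Int))
                = 1 + ((xs.takeWhile (· == (1:Int))).length : Int) := by omega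
            rw [h0]
            have := pvResA_hoist ys (1 + ((xs.takeWhile (· == (1:Int))).length : Int)) 0 le_rfl
            simpa [pvResA] using this
          -- B side
          have hBres : pvResA 0 0 (y :: ys) = pvResA 0 0 ys := by
            simp [pvResA, List.foldl_cons, pvStepA, hyno, hy1]
          have hBeq : pvResA 0 0 (y :: ys) = pvGoB 0 (y :: ys) :=
            ih (y :: ys) (by rw [hrest] at hrestlen; exact hrestlen)
              (fun z hz => by
                rcases List.mem_cons.mp hz with h | h
                · subst h; exact hyno
                · exact hysno z h)
          rw [hA, hrest, hAside,
              show pvGoB 0 (1 :: xs)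
                  = pvGoB (max 0 ((1 : Int) + (xs.takeWhile (· == (1:Int))).length))
                      (xs.dropWhile (· == (1:Int))) from by rw [pvGoB]; norm_num,
              hrest,
              pvGoB_hoist (y :: ys).length (y :: ys) le_rfl _ (le_max_left _ _),
              ← hBeq, hBres]
          omega
      · -- leading run of non-1s: both sides ignore it
        have hflush : (xs.takeWhile (· == x)).foldl pvStepA ((0:Int), (0:Int)) = (0, 0) :=
          pvfold_flush _ (fun y hy => by
            have := htake1 y hy; subst this; exact ⟨h1, hxno⟩)
        have hA : pvResA 0 0 (x :: xs) = pvResA 0 0 (xs.dropWhile (· == x)) := by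
          simp only [pvResA, List.foldl_cons, pvStepA, hxno, h1, if_false]
          norm_num
          conv_lhs => rw [← hsplit]
          rw [List.foldl_append, hflush]
        rw [hA, pvGoB, if_neg h1]
        exact ih _ hrestlen hrestno

-- ===== VERDICT (by name: the statement is the Claim_ definition above) =====
theorem calcOnes_spec : Claim_equal_calcOnes := by
  intro nums _
  unfold Spec_calcOnes calcOnes calcOnes_alt
  rw [show ((PySem.List.pyRange 0 (nums.length : Int) 1).foldl
      (fun acc i => pvStepA acc (PySem.List.pyGetD nums i 0)) ((0 : Int), (0 : Int)))
      = nums.foldl pvStepA ((0:Int), (0:Int)) from by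
    simpa using PySem.List.foldl_pyRange_pyGetD' (f := pvStepA) (xs := nums)
      (d := 0) (init := ((0:Int),(0:Int))) (a := 0) le_rfl]
  rw [pvfold_filter]
  have hfil : ∀ x ∈ nums.filter (fun x => x != -1), x ≠ -1 := by
    intro x hx
    have := List.of_mem_filter hx
    simpa using this
  have := pvMain (nums.filter (fun x => x != -1)).length _ le_rfl hfil
  simpa [pvResA] using this
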